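-- pv_equiv track=rewrite | github.com/diofant/diofant | diofant/polys/densebasic.py | dmp_ground_p
-- ===== SOURCE A (Python) =====
-- def dmp_zero_p(f, u):
--     """
--     Return ``True`` if ``f`` is zero in ``K[X]``.
--
--     Examples
--     ========
--
--     >>> dmp_zero_p([[[[[]]]]], 4)
--     True
--     >>> dmp_zero_p([[[[[1]]]]], 4)
--     False
--     """
--     while u:
--         if len(f) != 1:
--             return False
--
--         f = f[0]
--         u -= 1
--
--     return not f
--
-- def dmp_ground_p(f, c, u):
--     """
--     Return True if ``f`` is constant in ``K[X]``.
--
--     Examples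
--     ========
--
--     >>> dmp_ground_p([[[3]]], 3, 2)
--     True
--     >>> dmp_ground_p([[[4]]], None, 2)
--     True
--     """
--     if c is not None and not c:
--         return dmp_zero_p(f, u)
--
--     while u:
--         if len(f) != 1:
--             return False
--         f = f[0]
--         u -= 1
--
--     if c is None:
--         return len(f) <= 1
--     else:
--         return f == [c]
-- ===== SOURCE B (Python) =====
-- def dmp_ground_p(f, c, u):
--     if u:
--         return len(f) == 1 and dmp_ground_p(f[0], c, u - 1)
--     if c is None:
--         return len(f) <= 1
--     if not c:
--         return not f
--     return f == [c]
-- ===== Notes on version B (the rewrite author's own statement) =====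
-- stated objective: simpler
-- what changed: Replaced A's helper call (dmp_zero_p) plus two separate while-loops and a final three-way return by a single direct recursion over the nesting level with the constant-kind dispatch (None / zero / nonzero) done once at the base case.
import Mathlib
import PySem

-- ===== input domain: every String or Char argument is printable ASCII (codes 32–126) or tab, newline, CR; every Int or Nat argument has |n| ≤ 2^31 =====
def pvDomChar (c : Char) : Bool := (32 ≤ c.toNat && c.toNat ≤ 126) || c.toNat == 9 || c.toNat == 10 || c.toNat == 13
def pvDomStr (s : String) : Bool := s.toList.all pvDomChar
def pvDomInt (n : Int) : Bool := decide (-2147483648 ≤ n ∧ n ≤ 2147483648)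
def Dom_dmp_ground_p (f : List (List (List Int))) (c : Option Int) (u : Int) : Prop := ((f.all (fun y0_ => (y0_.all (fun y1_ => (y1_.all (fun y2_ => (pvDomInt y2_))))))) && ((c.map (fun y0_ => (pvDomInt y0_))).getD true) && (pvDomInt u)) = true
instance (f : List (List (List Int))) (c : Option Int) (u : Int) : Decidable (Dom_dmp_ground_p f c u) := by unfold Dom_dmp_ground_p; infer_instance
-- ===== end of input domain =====

-- B replaces A's helper call plus two separate while-loops by one direct recursion over the
-- nesting level with the constant-kind dispatch at the base case (objective: simpler).
-- Mutation: none (neither program mutates its arguments).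

-- ===== PORT A =====
-- Python's `while u:` descends through the nesting levels; the fixed Lean type forces the loop
-- to be unrolled over the three levels (the loop body is transcribed identically at each level).
def dmp_zero_p_port (f : List (List (List Int))) (u : Int) : Bool :=
  if u = 0 then f == [] else                         -- return not f
  if f.length ≠ 1 then false else
  let f1 := f.headD []                               -- f = f[0]; u -= 1
  if u - 1 = 0 then f1 == [] else
  if f1.length ≠ 1 then false else
  let f2 := f1.headD []
  if u - 2 = 0 then f2 == [] else
  if f2.length ≠ 1 then false else
  let z := f2.headD 0
  if u - 3 = 0 then z == 0 else                      -- not f with f an int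
  false                                              -- Python raises TypeError here (len of int); excluded by Pre_

def dmp_ground_p (f : List (List (List Int))) (c : Option Int) (u : Int) : Bool :=
  -- if c is not None and not c: return dmp_zero_p(f, u)
  if (match c with | some v => decide (v = 0) | none => false) then dmp_zero_p_port f u
  else
    -- the while loop, unrolled over the three nesting levels as above
    if u = 0 then
      (match c with
       | none => decide (f.length ≤ 1)               -- len(f) <= 1
       | some _ => false)                            -- f == [c]: list-of-lists vs int, Python False
    else
    if f.length ≠ 1 then false else
    let f1 := f.headD []
    if u - 1 = 0 then
      (match c with
       | none => decide (f1.length ≤ 1)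
       | some _ => false)
    else
    if f1.length ≠ 1 then false else
    let f2 := f1.headD []
    if u - 2 = 0 then
      (match c with
       | none => decide (f2.length ≤ 1)
       | some v => f2 == [v])                        -- f == [c]
    else
    if f2.length ≠ 1 then false else
    let _z := f2.headD 0        -- f = f[0]
    if u - 3 = 0 then
      (match c with
       | none => false                               -- len(int): TypeError; excluded by Pre_
       | some _ => false)                            -- int == [c]: Python False
    else
    false                                            -- len(int) in the loop: TypeError; excluded by Pre_

-- ===== PORT B =====
-- B's single recursion, likewise unrolled over the nesting levels the fixed type provides;
-- each level is the same recursive step `if u: len(f)==1 and rec(f[0], c, u-1)`.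
def dmp_ground_p_alt0 (z : Int) (c : Option Int) (u : Int) : Bool :=
  if u ≠ 0 then false                                -- len(int): TypeError; excluded by Pre_
  else match c with
  | none => false                                    -- len(int): TypeError; excluded by Pre_
  | some v => if v = 0 then z == 0 else false        -- not f / f == [c] (int vs list: False)

def dmp_ground_p_alt1 (f : List Int) (c : Option Int) (u : Int) : Bool :=
  if u ≠ 0 then f.length == 1 && dmp_ground_p_alt0 (f.headD 0) c (u - 1)
  else match c with
  | none => decide (f.length ≤ 1)
  | some v => if v = 0 then f == [] else f == [v]

def dmp_ground_p_alt2 (f : List (List Int)) (c : Option Int) (u : Int) : Bool :=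
  if u ≠ 0 then f.length == 1 && dmp_ground_p_alt1 (f.headD []) c (u - 1)
  else match c with
  | none => decide (f.length ≤ 1)
  | some v => if v = 0 then f == [] else false       -- f == [c]: list-of-lists vs int, Python False

def dmp_ground_p_alt (f : List (List (List Int))) (c : Option Int) (u : Int) : Bool :=
  if u ≠ 0 then f.length == 1 && dmp_ground_p_alt2 (f.headD []) c (u - 1)
  else match c with
  | none => decide (f.length ≤ 1)
  | some v => if v = 0 then f == [] else false

-- ===== PRECONDITION & SPEC =====
-- Pre_ excludes exactly the inputs where Python A raises TypeError (len of an int): a full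
-- singleton chain [[[z]]] descended past its three levels, i.e. u < 0, u ≥ 4, or u = 3 with c None.
def Pre_dmp_ground_p (f : List (List (List Int))) (c : Option Int) (u : Int) : Prop :=
  (f.length = 1 ∧ (f.headD []).length = 1 ∧ ((f.headD []).headD []).length = 1) →
    (0 ≤ u ∧ u ≤ 3 ∧ ¬(u = 3 ∧ c = none))
instance (f : List (List (List Int))) (c : Option Int) (u : Int) : Decidable (Pre_dmp_ground_p f c u) := by unfold Pre_dmp_ground_p; infer_instance

def pvWitness_dmp_ground_p : List (List (List Int)) × Option Int × Int := ([[[3]]], some 3, 2)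

def Spec_dmp_ground_p (f : List (List (List Int))) (c : Option Int) (u : Int) (out : Bool) : Prop := out = dmp_ground_p_alt f c u
instance (f : List (List (List Int))) (c : Option Int) (u : Int) (out : Bool) : Decidable (Spec_dmp_ground_p f c u out) := by unfold Spec_dmp_ground_p; infer_instance

-- ===== CLAIM (what is proved, stated in full; the proofs are below) =====
def Claim_equal_dmp_ground_p : Prop := ∀ (f : List (List (List Int))) (c : Option Int) (u : Int), Dom_dmp_ground_p f c u → Pre_dmp_ground_p f c u → Spec_dmp_ground_p f c u (dmp_ground_p f c u)

-- ===== LEMMAS AND PROOFS =====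

-- the two ports agree on every input (even outside Pre_, where both return false)
theorem ports_agree (f : List (List (List Int))) (c : Option Int) (u : Int) :
    dmp_ground_p f c u = dmp_ground_p_alt f c u := by
  have e2 : u - 1 - 1 = u - 2 := by ring
  by_cases h0 : u = 0
  · subst h0
    rcases c with _ | v
    · simp [dmp_ground_p, dmp_ground_p_alt]
    · by_cases hv : v = 0 <;>
        simp [dmp_ground_p, dmp_ground_p_alt, dmp_zero_p_port, hv]
  · rcases f with _ | ⟨f1, fs⟩
    · rcases c with _ | v
      · simp [dmp_ground_p, dmp_ground_p_alt, h0]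
      · by_cases hv : v = 0 <;>
          simp [dmp_ground_p, dmp_ground_p_alt, dmp_zero_p_port, hv, h0]
    · rcases fs with _ | ⟨g, gs⟩
      · -- f = [f1]; descend one level
        by_cases h1 : u - 1 = 0
        · rcases c with _ | v
          · simp [dmp_ground_p, dmp_ground_p_alt, dmp_ground_p_alt2, h0, h1]
          · by_cases hv : v = 0 <;>
              simp [dmp_ground_p, dmp_ground_p_alt, dmp_zero_p_port,
                dmp_ground_p_alt2, hv, h0, h1]
        · rcases f1 with _ | ⟨f2, fs1⟩
          · rcases c with _ | v
            · simp [dmp_ground_p, dmp_ground_p_alt, dmp_ground_p_alt2, h0, h1]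
            · by_cases hv : v = 0 <;>
                simp [dmp_ground_p, dmp_ground_p_alt, dmp_zero_p_port,
                  dmp_ground_p_alt2, hv, h0, h1]
          · rcases fs1 with _ | ⟨g1, gs1⟩
            · -- f = [[f2]]; descend another level
              by_cases h2 : u - 2 = 0
              · rcases c with _ | v
                · simp [dmp_ground_p, dmp_ground_p_alt, dmp_ground_p_alt2,
                    dmp_ground_p_alt1, e2, h0, h1, h2]
                · by_cases hv : v = 0 <;>
                    simp [dmp_ground_p, dmp_ground_p_alt, dmp_zero_p_port,
                      dmp_ground_p_alt2, dmp_ground_p_alt1, hv, e2, h0, h1, h2]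
              · rcases f2 with _ | ⟨z, fs2⟩
                · rcases c with _ | v
                  · simp [dmp_ground_p, dmp_ground_p_alt, dmp_ground_p_alt2,
                      dmp_ground_p_alt1, e2, h0, h1, h2]
                  · by_cases hv : v = 0 <;>
                      simp [dmp_ground_p, dmp_ground_p_alt, dmp_zero_p_port,
                        dmp_ground_p_alt2, dmp_ground_p_alt1, hv, e2, h0, h1, h2]
                · rcases fs2 with _ | ⟨z2, gs2⟩
                  · -- f = [[[z]]]; leaf level
                    by_cases h3 : u - 3 = 0
                    · rcases c with _ | v
                      · simp [dmp_ground_p, dmp_ground_p_alt, dmp_ground_p_alt2,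
                          dmp_ground_p_alt1, dmp_ground_p_alt0, e2, h0, h1, h2, h3]
                      · by_cases hv : v = 0
                        · simp [dmp_ground_p, dmp_ground_p_alt, dmp_zero_p_port,
                            dmp_ground_p_alt2, dmp_ground_p_alt1, dmp_ground_p_alt0,
                            hv, e2, h0, h1, h2, h3]
                          omega
                        · simp [dmp_ground_p, dmp_ground_p_alt,
                            dmp_ground_p_alt2, dmp_ground_p_alt1, dmp_ground_p_alt0,
                            hv, e2, h0, h1, h2, h3]
                    · rcases c with _ | v
                      · simp [dmp_ground_p, dmp_ground_p_alt, dmp_ground_p_alt2,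
                          dmp_ground_p_alt1, dmp_ground_p_alt0, e2, h0, h1, h2, h3]
                      · by_cases hv : v = 0
                        · simp [dmp_ground_p, dmp_ground_p_alt, dmp_zero_p_port,
                            dmp_ground_p_alt2, dmp_ground_p_alt1, dmp_ground_p_alt0,
                            hv, e2, h0, h1, h2, h3]
                          omega
                        · simp [dmp_ground_p, dmp_ground_p_alt,
                            dmp_ground_p_alt2, dmp_ground_p_alt1, dmp_ground_p_alt0,
                            hv, e2, h0, h1, h2, h3]
                  · rcases c with _ | v
                    · simp [dmp_ground_p, dmp_ground_p_alt, dmp_ground_p_alt2,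
                        dmp_ground_p_alt1, dmp_ground_p_alt0, e2, h0, h1, h2]
                    · by_cases hv : v = 0 <;>
                        simp [dmp_ground_p, dmp_ground_p_alt, dmp_zero_p_port,
                          dmp_ground_p_alt2, dmp_ground_p_alt1, dmp_ground_p_alt0,
                          hv, e2, h0, h1, h2]
            · rcases c with _ | v
              · simp [dmp_ground_p, dmp_ground_p_alt, dmp_ground_p_alt2,
                  dmp_ground_p_alt1, h0, h1]
              · by_cases hv : v = 0 <;>
                  simp [dmp_ground_p, dmp_ground_p_alt, dmp_zero_p_port,
                    dmp_ground_p_alt2, dmp_ground_p_alt1, hv, h0, h1]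
      · rcases c with _ | v
        · simp [dmp_ground_p, dmp_ground_p_alt, h0]
        · by_cases hv : v = 0 <;>
            simp [dmp_ground_p, dmp_ground_p_alt, dmp_zero_p_port, hv, h0]

-- ===== VERDICT (by name: the statement is the Claim_ definition above) =====
theorem dmp_ground_p_spec : Claim_equal_dmp_ground_p := by
  intro f c u _ _
  exact ports_agree f c u
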